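-- pv_equiv track=rewrite | github.com/febos/urslib2 | SS/Sign.py | offChildren
-- ===== SOURCE A (Python) =====
-- def offChildren(scheme,ecfs,ecf):
--
--     scheme2 = []
--     masc    = [1]*len(scheme)
--
--     for m in ecfs:
--         if m[0] > ecf[0]:
--             for i in range(m[0],m[1]+1): masc[i] = 0
--
--     for i in range(ecf[0],ecf[1]+1):
--         if masc[i]: scheme2.append(scheme[i])
--
--     return scheme2
-- ===== SOURCE B (Python) =====
-- def offChildren(scheme, ecfs, ecf):
--     lo, hi = ecf
--     return [scheme[i] for i in range(lo, hi + 1)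
--             if not any(a > lo and a <= i <= b for a, b in ecfs)]
-- ===== Notes on version B (the rewrite author's own statement) =====
-- stated objective: simpler
-- what changed: B drops A's full-length mask array and its two marking/scanning loops, emitting scheme[i] directly for each i in the ecf range that no qualifying child interval covers (single comprehension with an interval-membership test).
-- outside the precondition, e.g. on offChildren([10, 20, 30], [(2, 2)], (-2, -1)): A returns [20], B returns [20, 30]
import Mathlib
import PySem

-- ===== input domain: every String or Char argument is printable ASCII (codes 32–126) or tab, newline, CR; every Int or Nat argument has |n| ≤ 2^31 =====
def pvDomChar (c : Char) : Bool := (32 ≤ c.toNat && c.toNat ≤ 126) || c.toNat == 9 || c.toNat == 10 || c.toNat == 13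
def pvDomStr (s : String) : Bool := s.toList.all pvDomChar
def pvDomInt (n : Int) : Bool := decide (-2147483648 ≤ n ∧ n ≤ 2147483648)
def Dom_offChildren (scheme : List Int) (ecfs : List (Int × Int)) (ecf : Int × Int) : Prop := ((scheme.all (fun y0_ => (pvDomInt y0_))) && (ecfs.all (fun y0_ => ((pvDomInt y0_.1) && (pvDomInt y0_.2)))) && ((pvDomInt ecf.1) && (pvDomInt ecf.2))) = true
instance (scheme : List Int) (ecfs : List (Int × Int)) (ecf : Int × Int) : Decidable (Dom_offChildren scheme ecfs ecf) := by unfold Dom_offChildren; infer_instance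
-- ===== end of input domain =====

-- B drops A's full-length mask array and its marking loops: it emits scheme[i] for each i
-- in the ecf range that no qualifying child interval covers (one comprehension; objective: simpler).

-- ===== PORT A =====
-- 'for i in range(m[0],m[1]+1): masc[i] = 0'
def pvMark (masc : List Int) (m : Int × Int) : List Int :=
  (PySem.List.pyRange m.1 (m.2 + 1) 1).foldl (fun s i => PySem.List.pySetD s i 0) masc

-- masc[i]= / masc[i] / scheme[i] are ported with pySetD/pyGetD (total forms); Pre_ keeps every
-- accessed index nonnegative and in range, exactly where Python neither raises nor wraps.
def offChildren (scheme : List Int) (ecfs : List (Int × Int)) (ecf : Int × Int) : List Int :=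
  let masc0 := List.replicate scheme.length (1 : Int)
  let masc := ecfs.foldl (fun s m => if m.1 > ecf.1 then pvMark s m else s) masc0
  (PySem.List.pyRange ecf.1 (ecf.2 + 1) 1).foldl
    (fun acc i => if PySem.List.pyGetD masc i 0 ≠ 0 then acc ++ [PySem.List.pyGetD scheme i 0]
                  else acc) []

-- ===== PORT B =====
def offChildren_alt (scheme : List Int) (ecfs : List (Int × Int)) (ecf : Int × Int) : List Int :=
  ((PySem.List.pyRange ecf.1 (ecf.2 + 1) 1).filter
      (fun i => !(ecfs.any (fun m => decide (ecf.1 < m.1) && decide (m.1 ≤ i) && decide (i ≤ m.2))))).map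
    (fun i => PySem.List.pyGetD scheme i 0)

-- ===== PRECONDITION & SPEC =====
-- Pre_ restricts to the natural domain where every index A touches is in [0, len(scheme)):
-- outside it A either raises IndexError or silently wraps negative indices around the list,
-- an artefact of Python indexing that no caller would specify.
def Pre_offChildren (scheme : List Int) (ecfs : List (Int × Int)) (ecf : Int × Int) : Prop :=
  (ecf.1 ≤ ecf.2 → 0 ≤ ecf.1 ∧ ecf.2 < (scheme.length : Int)) ∧
  ∀ m ∈ ecfs, ecf.1 < m.1 → m.1 ≤ m.2 → 0 ≤ m.1 ∧ m.2 < (scheme.length : Int)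

instance (scheme : List Int) (ecfs : List (Int × Int)) (ecf : Int × Int) : Decidable (Pre_offChildren scheme ecfs ecf) := by unfold Pre_offChildren; infer_instance

def pvWitness_offChildren : List Int × (List (Int × Int)) × (Int × Int) :=
  ([10, 20, 30, 40], [(2, 3), (0, 0)], (0, 3))

def Spec_offChildren (scheme : List Int) (ecfs : List (Int × Int)) (ecf : Int × Int) (out : List Int) : Prop := out = offChildren_alt scheme ecfs ecf
instance (scheme : List Int) (ecfs : List (Int × Int)) (ecf : Int × Int) (out : List Int) : Decidable (Spec_offChildren scheme ecfs ecf out) := by unfold Spec_offChildren; infer_instance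

-- ===== CLAIM (what is proved, stated in full; the proofs are below) =====
def Claim_equal_offChildren : Prop := ∀ (scheme : List Int) (ecfs : List (Int × Int)) (ecf : Int × Int), Dom_offChildren scheme ecfs ecf → Pre_offChildren scheme ecfs ecf → Spec_offChildren scheme ecfs ecf (offChildren scheme ecfs ecf)

-- ===== LEMMAS AND PROOFS =====

-- length is preserved by any fold of pySetD writes
theorem pv_length_setfold (idxs : List Int) (masc : List Int) :
    (idxs.foldl (fun s i => PySem.List.pySetD s i 0) masc).length = masc.length := by
  induction idxs generalizing masc with
  | nil => rfl
  | cons i rest ih => simp [List.foldl, ih, PySem.List.length_pySetD]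

-- value left in the mask by one marking loop over range(a, b)
theorem pv_mark_get (n : Nat) : ∀ (masc : List Int) (a b j : Int),
    (b - a).toNat ≤ n → (a < b → 0 ≤ a ∧ b ≤ (masc.length : Int)) →
    0 ≤ j → j < (masc.length : Int) →
    PySem.List.pyGetD ((PySem.List.pyRange a b 1).foldl (fun s i => PySem.List.pySetD s i 0) masc) j 0
      = if a ≤ j ∧ j < b then 0 else PySem.List.pyGetD masc j 0 := by
  induction n with
  | zero =>
    intro masc a b j hn _ _ _
    have hab : b ≤ a := by omega
    rw [PySem.List.pyRange_one_eq_nil hab]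
    simp only [List.foldl_nil]
    rw [if_neg (by omega)]
  | succ n ih =>
    intro masc a b j hn hrange hj0 hj
    by_cases hab : b ≤ a
    · rw [PySem.List.pyRange_one_eq_nil hab]
      simp only [List.foldl_nil]
      rw [if_neg (by omega)]
    · have hab' : a < b := by omega
      obtain ⟨ha0, hbl⟩ := hrange hab'
      rw [PySem.List.pyRange_one_cons hab']
      simp only [List.foldl_cons]
      have hlenN : (PySem.List.pySetD masc a 0).length = masc.length :=
        PySem.List.length_pySetD masc a 0
      rw [ih (PySem.List.pySetD masc a 0) (a + 1) b j (by omega)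
            (fun _ => ⟨by omega, by rw [hlenN]; exact hbl⟩) hj0 (by rw [hlenN]; exact hj)]
      rw [PySem.List.pySetD_of_nonneg masc (0 : Int) ha0]
      have hjl : j < ((masc.set a.toNat 0).length : Int) := by simpa using hj
      rw [PySem.List.pyGetD_eq_getElem (masc.set a.toNat 0) 0 hj0 hjl,
          PySem.List.pyGetD_eq_getElem masc 0 hj0 hj]
      rw [List.getElem_set]
      rcases eq_or_ne a.toNat j.toNat with he | he
      · rw [if_neg (by omega : ¬(a + 1 ≤ j ∧ j < b)), if_pos he, if_pos (by omega)]
      · rw [if_neg he]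
        by_cases hc : a + 1 ≤ j ∧ j < b
        · rw [if_pos hc, if_pos (by omega)]
        · rw [if_neg hc, if_neg (by omega)]

-- value left in the mask by the whole child loop
theorem pv_outer_get (lo : Int) : ∀ (ecfs : List (Int × Int)) (masc : List Int) (j : Int),
    (∀ m ∈ ecfs, lo < m.1 → m.1 ≤ m.2 → 0 ≤ m.1 ∧ m.2 < (masc.length : Int)) →
    0 ≤ j → j < (masc.length : Int) →
    PySem.List.pyGetD (ecfs.foldl (fun s m => if m.1 > lo then pvMark s m else s) masc) j 0
      = if ecfs.any (fun m => decide (lo < m.1) && decide (m.1 ≤ j) && decide (j ≤ m.2)) then 0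
        else PySem.List.pyGetD masc j 0 := by
  intro ecfs
  induction ecfs with
  | nil => intro masc j _ _ _; simp
  | cons m rest ih =>
    intro masc j hpre hj0 hj
    simp only [List.foldl_cons, List.any_cons]
    by_cases hm : m.1 > lo
    · rw [if_pos hm]
      have hlen : ((pvMark masc m).length : Int) = (masc.length : Int) := by
        simp [pvMark, pv_length_setfold]
      rw [ih (pvMark masc m) j
            (fun m' hm' h1 h2 => by
              have := hpre m' (List.mem_cons_of_mem _ hm') h1 h2; omega)
            hj0 (by omega)]
      have hmark : PySem.List.pyGetD (pvMark masc m) j 0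
          = if m.1 ≤ j ∧ j < m.2 + 1 then 0 else PySem.List.pyGetD masc j 0 := by
        unfold pvMark
        apply pv_mark_get (m.2 + 1 - m.1).toNat masc m.1 (m.2 + 1) j le_rfl
        · intro h
          have := hpre m (List.mem_cons_self) hm (by omega)
          omega
        · exact hj0
        · exact hj
      by_cases hc : m.1 ≤ j ∧ j ≤ m.2
      · have hd : (decide (lo < m.1) && decide (m.1 ≤ j) && decide (j ≤ m.2)) = true := by
          simp [hm, hc.1, hc.2]
        simp only [hd, Bool.true_or, if_true]
        split
        · rfl
        · rw [hmark, if_pos (by omega)]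
      · have hd : (decide (lo < m.1) && decide (m.1 ≤ j) && decide (j ≤ m.2)) = false := by
          simp only [Bool.and_eq_false_iff, decide_eq_false_iff_not, not_le, not_lt]
          omega
        simp only [hd, Bool.false_or]
        split
        · rfl
        · rw [hmark, if_neg (by omega)]
    · rw [if_neg hm]
      rw [ih masc j (fun m' hm' => hpre m' (List.mem_cons_of_mem _ hm')) hj0 hj]
      have hd : (decide (lo < m.1) && decide (m.1 ≤ j) && decide (j ≤ m.2)) = false := by
        simp only [Bool.and_eq_false_iff, decide_eq_false_iff_not, not_le, not_lt]
        omega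
      simp only [hd, Bool.false_or]

-- 'if p(x): out.append(f(x))' loop shape
theorem pv_foldl_app (l : List Int) (p : Int → Prop) [DecidablePred p] (f : Int → Int)
    (acc : List Int) :
    l.foldl (fun acc x => if p x then acc ++ [f x] else acc) acc
      = acc ++ (l.filter (fun x => decide (p x))).map f := by
  induction l generalizing acc with
  | nil => simp
  | cons x rest ih =>
    simp only [List.foldl_cons, List.filter_cons]
    by_cases hp : p x
    · rw [if_pos hp, ih]; simp [hp]
    · rw [if_neg hp, ih]; simp [hp]

-- ===== VERDICT (by name: the statement is the Claim_ definition above) =====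
theorem offChildren_spec : Claim_equal_offChildren := by
  intro scheme ecfs ecf _hdom hpre
  obtain ⟨hecf, hkids⟩ := hpre
  unfold Spec_offChildren offChildren offChildren_alt
  rw [pv_foldl_app, List.nil_append]
  congr 1
  apply List.filter_congr
  intro i hi
  rw [PySem.List.mem_pyRange_one] at hi
  have hne : ecf.1 ≤ ecf.2 := by omega
  obtain ⟨hlo, hhi⟩ := hecf hne
  have hget := pv_outer_get ecf.1 ecfs (List.replicate scheme.length (1 : Int)) i
      (by intro m hm h1 h2; have := hkids m hm h1 h2; simpa using this)
      (by omega) (by simp; omega)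
  have hone : PySem.List.pyGetD (List.replicate scheme.length (1 : Int)) i 0 = 1 := by
    rw [PySem.List.pyGetD_eq_getElem (List.replicate scheme.length (1 : Int)) 0 (by omega)
          (by simp; omega)]
    simp
  rw [hget]
  cases hany : ecfs.any (fun m => decide (ecf.1 < m.1) && decide (m.1 ≤ i) && decide (i ≤ m.2)) with
  | true => simp
  | false => simp [hone]
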